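-- pv_equiv track=rewrite | github.com/oxysub/beeline | bl_upload.py | iter_request_segments
-- ===== SOURCE A (Python) =====
-- from typing import (
--     Any,
--     BinaryIO,
--     Callable,
--     Dict,
--     Iterator,
--     List,
--     Optional,
--     Tuple,
--     Union,
-- )
--
-- AIRTABLE_BATCH_SIZE = 5
--
-- def iter_request_segments(
--     rows_list: List[Tuple[Any, Any]], airtable_records: dict
-- ) -> Iterator[Tuple[str, List[Tuple[str, Any]]]]:
--     """
--     Yields (operation, segment) where op is "insert" or "update" and each segment
--     is at most AIRTABLE_BATCH_SIZE consecutive rows in file order, all the same op.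
--     """
--     n = len(rows_list)
--     i = 0
--     while i < n:
--         _, row = rows_list[i]
--         request_id = str(row["Request-ID"]).strip()
--         is_update = request_id in airtable_records
--         op = "update" if is_update else "insert"
--         segment: List[Tuple[str, Any]] = []
--         while i < n:
--             _, row2 = rows_list[i]
--             rid2 = str(row2["Request-ID"]).strip()
--             is_u2 = rid2 in airtable_records
--             o2 = "update" if is_u2 else "insert"
--             if o2 != op:
--                 break
--             segment.append((rid2, row2))
--             i += 1
--             if len(segment) == AIRTABLE_BATCH_SIZE:
--                 break
--         yield op, segment
-- ===== SOURCE B (Python) =====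
-- from itertools import groupby
-- from typing import Any, Iterator, List, Tuple
--
-- AIRTABLE_BATCH_SIZE = 5
--
-- def iter_request_segments(
--     rows_list: List[Tuple[Any, Any]], airtable_records: dict
-- ) -> Iterator[Tuple[str, List[Tuple[str, Any]]]]:
--     # One pass tags each row with its op, groupby finds maximal same-op runs,
--     # each run is sliced into chunks of at most AIRTABLE_BATCH_SIZE.
--     tagged = []
--     for _, row in rows_list:
--         rid = str(row["Request-ID"]).strip()
--         op = "update" if rid in airtable_records else "insert"
--         tagged.append((op, (rid, row)))
--     for op, grp in groupby(tagged, key=lambda t: t[0]):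
--         items = [p for _, p in grp]
--         while items:
--             yield op, items[:AIRTABLE_BATCH_SIZE]
--             items = items[AIRTABLE_BATCH_SIZE:]
-- ===== Notes on version B (the rewrite author's own statement) =====
-- stated objective: idiomatic
-- what changed: A drives two nested index-based while loops that build each at-most-5-row segment in place; B makes one tagging pass, uses itertools.groupby to find maximal consecutive same-op runs, and slices each run into chunks of at most AIRTABLE_BATCH_SIZE.
-- outside the precondition, e.g. on iter_request_segments([('x', {})], {}): A raises KeyError, B raises KeyError
import Mathlib
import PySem

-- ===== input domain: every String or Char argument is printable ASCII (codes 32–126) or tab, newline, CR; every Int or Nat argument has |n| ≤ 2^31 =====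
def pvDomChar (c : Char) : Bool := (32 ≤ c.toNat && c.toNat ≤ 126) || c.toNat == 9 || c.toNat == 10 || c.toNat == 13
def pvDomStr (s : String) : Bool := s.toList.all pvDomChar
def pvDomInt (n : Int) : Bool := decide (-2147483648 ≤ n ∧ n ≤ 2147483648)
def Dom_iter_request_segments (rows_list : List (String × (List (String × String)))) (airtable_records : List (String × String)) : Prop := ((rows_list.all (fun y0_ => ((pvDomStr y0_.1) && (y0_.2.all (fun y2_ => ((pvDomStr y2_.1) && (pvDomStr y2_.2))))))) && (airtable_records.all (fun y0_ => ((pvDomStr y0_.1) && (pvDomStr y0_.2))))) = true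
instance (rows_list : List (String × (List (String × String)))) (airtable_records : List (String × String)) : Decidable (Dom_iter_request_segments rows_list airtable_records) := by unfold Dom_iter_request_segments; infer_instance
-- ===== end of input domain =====

-- B replaces A's nested index-driven while loops by a tag-then-groupby-then-chunk pipeline (objective: idiomatic decomposition).
-- A is a generator; both ports return the list of yielded (op, segment) pairs.

-- ===== PORT A =====
-- str(row["Request-ID"]).strip(): first-match dict lookup, then strip (value is a string, str() is identity)
def pvRid (row : List (String × String)) : String :=
  PySem.Str.strip (((PySem.Dict.mk row).get? "Request-ID").getD "")

-- '"update" if request_id in airtable_records else "insert"'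
def pvOp (air : List (String × String)) (rid : String) : String :=
  if (PySem.Dict.mk air).contains rid then "update" else "insert"

-- A's inner while loop: state = (remaining rows, segment accumulator); returns (segment, remaining)
def pvInnerA (air : List (String × String)) (op : String) :
    List (String × List (String × String)) → List (String × List (String × String)) →
    (List (String × List (String × String)) × List (String × List (String × String)))
  | [], seg => (seg, [])
  | r :: rest, seg =>
    let rid2 := pvRid r.2
    if pvOp air rid2 ≠ op then (seg, r :: rest)
    else
      let seg' := seg ++ [(rid2, r.2)]
      if seg'.length = 5 then (seg', rest)
      else pvInnerA air op rest seg'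

theorem pvInnerA_rest_le (air : List (String × String)) (op : String) :
    ∀ (l seg : List (String × List (String × String))),
      (pvInnerA air op l seg).2.length ≤ l.length := by
  intro l
  induction l with
  | nil => intro seg; simp [pvInnerA]
  | cons r rest ih =>
    intro seg
    simp only [pvInnerA]
    split
    · simp
    · split
      · simp
      · exact le_trans (ih _) (by simp)

theorem pvInnerA_head_lt (air : List (String × String))
    (r : String × List (String × String)) (rest seg : List (String × List (String × String))) :
    (pvInnerA air (pvOp air (pvRid r.2)) (r :: rest) seg).2.length < (r :: rest).length := by
  simp only [pvInnerA]
  split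
  · simp_all
  · split
    · simp
    · exact Nat.lt_succ_of_le (pvInnerA_rest_le _ _ _ _)

-- A's outer while loop
def pvOuterA (air : List (String × String)) :
    List (String × List (String × String)) →
    List (String × (List (String × (List (String × String)))))
  | [] => []
  | r :: rest =>
    let op := pvOp air (pvRid r.2)
    let p := pvInnerA air op (r :: rest) []
    (op, p.1) :: pvOuterA air p.2
  termination_by l => l.length
  decreasing_by exact pvInnerA_head_lt air r rest []

def iter_request_segments (rows_list : List (String × (List (String × String)))) (airtable_records : List (String × String)) : List (String × (List (String × (List (String × String))))) :=
  pvOuterA airtable_records rows_list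

-- ===== PORT B =====
-- first pass of Source B: tagged list built by appending (op, (rid, row))
def pvTagged (air : List (String × String)) (rows : List (String × List (String × String))) :
    List (String × (String × List (String × String))) :=
  rows.foldl (fun acc r =>
    let rid := pvRid r.2
    acc ++ [(pvOp air rid, (rid, r.2))]) []

-- itertools.groupby on the first component: span of the current key, then recurse
def pvSpanB (op : String) :
    List (String × (String × List (String × String))) →
    (List (String × List (String × String)) × List (String × (String × List (String × String))))
  | [] => ([], [])
  | (o, p) :: rest =>
    if o = op then
      let q := pvSpanB op rest
      (p :: q.1, q.2)
    else ([], (o, p) :: rest)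

theorem pvSpanB_rest_le (op : String) :
    ∀ l : List (String × (String × List (String × String))),
      (pvSpanB op l).2.length ≤ l.length := by
  intro l
  induction l with
  | nil => simp [pvSpanB]
  | cons x rest ih =>
    obtain ⟨o, p⟩ := x
    simp only [pvSpanB]
    split
    · exact le_trans ih (by simp)
    · simp

def pvGroupByB :
    List (String × (String × List (String × String))) →
    List (String × List (String × List (String × String)))
  | [] => []
  | (o, p) :: rest =>
    let q := pvSpanB o rest
    (o, p :: q.1) :: pvGroupByB q.2
  termination_by l => l.length
  decreasing_by exact Nat.lt_succ_of_le (pvSpanB_rest_le o rest)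

-- Source B's 'while items: yield items[:5]; items = items[5:]'
def pvChunksB : List (String × List (String × String)) → List (List (String × List (String × String)))
  | [] => []
  | x :: rest => ((x :: rest).take 5) :: pvChunksB ((x :: rest).drop 5)
  termination_by l => l.length
  decreasing_by simp

def iter_request_segments_alt (rows_list : List (String × (List (String × String)))) (airtable_records : List (String × String)) : List (String × (List (String × (List (String × String))))) :=
  (pvGroupByB (pvTagged airtable_records rows_list)).flatMap
    (fun g => (pvChunksB g.2).map (fun c => (g.1, c)))

-- ===== PRECONDITION & SPEC =====
-- Pre_ excludes rows whose dict lacks the key "Request-ID": there Python A raises KeyError.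
def Pre_iter_request_segments (rows_list : List (String × (List (String × String)))) (airtable_records : List (String × String)) : Prop :=
  ∀ r ∈ rows_list, (((PySem.Dict.mk r.2).get? "Request-ID").isSome = true)
instance (rows_list : List (String × (List (String × String)))) (airtable_records : List (String × String)) : Decidable (Pre_iter_request_segments rows_list airtable_records) := by unfold Pre_iter_request_segments; infer_instance

def pvWitness_iter_request_segments : (List (String × (List (String × String)))) × (List (String × String)) :=
  ([("a", [("Request-ID", " 1 ")]), ("b", [("Request-ID", "2")])], [("1", "x")])

def Spec_iter_request_segments (rows_list : List (String × (List (String × String)))) (airtable_records : List (String × String)) (out : List (String × (List (String × (List (String × String)))))) : Prop := out = iter_request_segments_alt rows_list airtable_records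
instance (rows_list : List (String × (List (String × String)))) (airtable_records : List (String × String)) (out : List (String × (List (String × (List (String × String)))))) : Decidable (Spec_iter_request_segments rows_list airtable_records out) := by unfold Spec_iter_request_segments; infer_instance

-- ===== CLAIM (what is proved, stated in full; the proofs are below) =====
def Claim_equal_iter_request_segments : Prop := ∀ (rows_list : List (String × (List (String × String)))) (airtable_records : List (String × String)), Dom_iter_request_segments rows_list airtable_records → Pre_iter_request_segments rows_list airtable_records → Spec_iter_request_segments rows_list airtable_records (iter_request_segments rows_list airtable_records)

-- ===== LEMMAS AND PROOFS =====

def pvKey (air : List (String × String)) (r : String × List (String × String)) : String :=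
  pvOp air (pvRid r.2)


def pvValF (_air : List (String × String)) (r : String × List (String × String)) :
    String × List (String × String) := (pvRid r.2, r.2)

def pvTagF (air : List (String × String)) (r : String × List (String × String)) :
    String × (String × List (String × String)) := (pvKey air r, pvValF air r)

theorem pvTagged_eq_map (air : List (String × String)) (rows : List (String × List (String × String))) :
    pvTagged air rows = rows.map (pvTagF air) := by
  unfold pvTagged
  rw [PySem.List.foldl_append_singleton_eq_map]
  rfl

theorem pvSpanB_run (air : List (String × String)) (op : String)
    (m : List (String × List (String × String)))
    (t : List (String × (String × List (String × String))))
    (hm : ∀ r ∈ m, pvKey air r = op)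
    (ht : ∀ x ∈ t.head?, x.1 ≠ op) :
    pvSpanB op (m.map (pvTagF air) ++ t) = (m.map (pvValF air), t) := by
  induction m with
  | nil =>
    cases t with
    | nil => simp [pvSpanB]
    | cons x xs =>
      obtain ⟨o, p⟩ := x
      have : o ≠ op := ht (o, p) (by simp)
      simp [pvSpanB, this]
  | cons r m' ih =>
    have hr : pvKey air r = op := hm r (by simp)
    simp [pvSpanB, pvTagF, hr, ih (fun x hx => hm x (by simp [hx]))]

theorem pvInnerA_run (air : List (String × String)) (op : String) :
    ∀ (m : List (String × List (String × String)))
      (rest seg : List (String × List (String × String))),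
      (∀ r ∈ m, pvKey air r = op) →
      (∀ x ∈ rest.head?, pvKey air x ≠ op) →
      seg.length < 5 →
      pvInnerA air op (m ++ rest) seg =
        (seg ++ (m.take (5 - seg.length)).map (pvValF air), (m.drop (5 - seg.length)) ++ rest) := by
  intro m
  induction m with
  | nil =>
    intro rest seg _ hrest hseg
    cases rest with
    | nil => simp [pvInnerA]
    | cons x xs =>
      have hx : pvKey air x ≠ op := hrest x (by simp)
      simp [pvInnerA, pvKey] at hx ⊢
      simp [hx]
  | cons r m' ih =>
    intro rest seg hm hrest hseg
    have hr : pvOp air (pvRid r.2) = op := hm r (by simp)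
    simp only [List.cons_append, pvInnerA, hr, ne_eq, not_true_eq_false, if_neg,
      not_false_eq_true]
    by_cases h5 : (seg ++ [(pvRid r.2, r.2)]).length = 5
    · rw [if_pos h5]
      have h51 : 5 - seg.length = 1 := by simp at h5; omega
      simp [h51, pvValF]
    · rw [if_neg h5]
      have hlen : (seg ++ [(pvRid r.2, r.2)]).length < 5 := by simp at h5 ⊢; omega
      rw [ih rest _ (fun x hx => hm x (by simp [hx])) hrest hlen]
      have h1 : 5 - seg.length = (5 - (seg ++ [(pvRid r.2, r.2)]).length) + 1 := by
        simp; omega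
      rw [h1]
      simp [pvValF]

theorem pvChunksB_cons (x : String × List (String × String)) (l : List (String × List (String × String))) :
    pvChunksB (x :: l) = ((x :: l).take 5) :: pvChunksB ((x :: l).drop 5) := by
  simp [pvChunksB]

theorem pvDropWhile_head?_false {α : Type} (p : α → Bool) (l : List α) (x : α)
    (h : (l.dropWhile p).head? = some x) : p x = false := by
  induction l with
  | nil => simp [List.dropWhile] at h
  | cons a as ih =>
    rw [List.dropWhile_cons] at h
    split at h
    · exact ih h
    · simp_all

theorem pvRunA (air : List (String × String)) (op : String) :
    ∀ (n : Nat) (m rest : List (String × List (String × String))),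
      m.length ≤ n →
      (∀ r ∈ m, pvKey air r = op) →
      (∀ x ∈ rest.head?, pvKey air x ≠ op) →
      pvOuterA air (m ++ rest) =
        ((pvChunksB (m.map (pvValF air))).map (fun c => (op, c))) ++ pvOuterA air rest := by
  intro n
  induction n with
  | zero =>
    intro m rest hn _ _
    have : m = [] := List.eq_nil_of_length_eq_zero (Nat.le_zero.mp hn)
    subst this; simp [pvChunksB]
  | succ n ih =>
    intro m rest hn hm hrest
    cases m with
    | nil => simp [pvChunksB]
    | cons r m' =>
      have hr : pvKey air r = op := hm r (by simp)
      have hstep : pvOuterA air ((r :: m') ++ rest) =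
          (op, ((r :: m').take 5).map (pvValF air)) ::
            pvOuterA air (((r :: m').drop 5) ++ rest) := by
        simp only [List.cons_append]
        rw [pvOuterA]
        simp only [pvKey] at hr
        rw [hr]
        have hins := pvInnerA_run air op (r :: m') rest [] hm hrest (by simp)
        simp only [List.cons_append] at hins
        rw [hins]
        simp
      rw [hstep]
      rw [ih ((r :: m').drop 5) rest (by simp at hn ⊢; omega)
        (fun x hx => hm x (List.mem_of_mem_drop hx)) hrest]
      simp only [List.map_cons]
      rw [pvChunksB_cons]
      simp [List.map_take, List.map_drop]

theorem pv_main_aux (air : List (String × String)) :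
    ∀ (n : Nat) (rows : List (String × List (String × String))), rows.length ≤ n →
      pvOuterA air rows =
        (pvGroupByB (rows.map (pvTagF air))).flatMap
          (fun g => (pvChunksB g.2).map (fun c => (g.1, c))) := by
  intro n
  induction n with
  | zero =>
    intro rows hn
    have : rows = [] := List.eq_nil_of_length_eq_zero (Nat.le_zero.mp hn)
    subst this; simp [pvOuterA, pvGroupByB]
  | succ n ih =>
    intro rows hn
    cases rows with
    | nil => simp [pvOuterA, pvGroupByB]
    | cons r rs =>
      set op := pvKey air r with hop
      set p : (String × List (String × String)) → Bool := fun x => pvKey air x == op with hp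
      have hpr : p r = true := by simp [hp, hop]
      have hmem : ∀ x ∈ r :: rs.takeWhile p, pvKey air x = op := by
        intro x hx
        rcases List.mem_cons.mp hx with h | h
        · subst h; exact hop.symm ▸ rfl
        · have := List.mem_takeWhile_imp h
          simpa [hp] using this
      have hbound : ∀ x ∈ (rs.dropWhile p).head?, pvKey air x ≠ op := by
        intro x hx
        rw [Option.mem_def] at hx
        have := pvDropWhile_head?_false p rs x hx
        simpa [hp] using this
      have hsplit : r :: rs = (r :: rs.takeWhile p) ++ rs.dropWhile p := by
        simp [List.takeWhile_append_dropWhile]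
      -- B side: one step of groupby
      have hGB : pvGroupByB ((r :: rs).map (pvTagF air)) =
          (op, (r :: rs.takeWhile p).map (pvValF air)) ::
            pvGroupByB ((rs.dropWhile p).map (pvTagF air)) := by
        conv_lhs => rw [hsplit]
        simp only [List.map_append, List.map_cons, List.cons_append]
        rw [pvGroupByB]
        have hspan := pvSpanB_run air op (rs.takeWhile p) ((rs.dropWhile p).map (pvTagF air))
          (fun x hx => hmem x (by simp [hx]))
          (by
            intro x hx
            cases hdwc : rs.dropWhile p with
            | nil => simp [hdwc] at hx
            | cons y ys =>
              simp [hdwc] at hx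
              have hy := hbound y (by simp [hdwc])
              simp [← hx, pvTagF]
              exact hy)
        have hkey : (pvTagF air r).1 = op := by simp [pvTagF, hop]
        simp only [pvTagF] at hspan ⊢
        rw [← hop, hspan]
      -- A side: one maximal run
      conv_lhs => rw [hsplit]
      rw [pvRunA air op (r :: rs).length _ _
        (by simpa using Nat.succ_le_succ (List.takeWhile_sublist p).length_le) hmem hbound]
      rw [hGB, List.flatMap_cons]
      rw [← ih (rs.dropWhile p)
        (le_trans (List.dropWhile_sublist p).length_le (by simp at hn; omega))]

theorem pv_main (air : List (String × String)) (rows : List (String × List (String × String))) :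
    pvOuterA air rows = iter_request_segments_alt rows air := by
  unfold iter_request_segments_alt
  rw [pvTagged_eq_map]
  exact pv_main_aux air rows.length rows le_rfl

-- ===== VERDICT (by name: the statement is the Claim_ definition above) =====
theorem iter_request_segments_spec : Claim_equal_iter_request_segments := by
  intro rows air _ _
  unfold Spec_iter_request_segments iter_request_segments
  exact pv_main air rows
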